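-- pv_equiv track=rewrite | github.com/smartplay28/posit_multiplier | value.py | mantissa_multiply
-- ===== SOURCE A (Python) =====
-- def full_adder(a, b, cin):
--     """A simple full adder"""
--     sum_bit = a ^ b ^ cin
--     carry_out = (a & b) | (cin & (a ^ b))
--     return sum_bit, carry_out
--
-- def adder(arr1, arr2):
--     """Adds two binary arrays"""
--     result = []
--     carry_in = 0
--     for a, b in zip(reversed(arr1), reversed(arr2)):
--         sum_bit, carry_out = full_adder(a, b, carry_in)
--         result.append(sum_bit)
--         carry_in = carry_out
--     return result[::-1]
--
-- def mantissa_multiply(n, es, count1, count2, num_array_a, num_array_b):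
--     """
--     The iterative mantissa multiplier from the user's methodology.
--     Note: The user passes count+1 for count1/count2 to align the indices.
--     """
--     index_a = count1 + 1 + es
--     index_b = count2 + 1 + es
--     k_arr = []
--     flag = 1
--     LS = 0
--
--     # This section appears to find the positions of '1's in frac_a
--     for i in range(index_a, n):
--         if num_array_a[i] == 1:
--             LS = LS + flag
--             k_arr.append(flag)
--             flag = 0
--
--         flag = flag + 1
--
--     # Get the fraction bits of B (excluding hidden bit)
--     arr = num_array_b[index_b:n]
--
--     # Add the hidden bit '1'
--     array_1 = [1] + arr[:-1] # This seems to be the mantissa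
--
--     dup_array = array_1
--     i = 0
--     n_frac = len(array_1)
--
--     # Iterative shift-and-add based on '1's in frac_a
--     while (i < len(k_arr)):
--         k = k_arr[i]
--         k = k % n_frac
--         array_2 = dup_array[-k:] + dup_array[:-k] # This is a bitwise rotation
--         i = i + 1
--         add = adder(array_1, array_2)
--         dup_array = array_2
--         array_1 = add
--
--     return array_1 # This is the final mantissa product
-- ===== SOURCE B (Python) =====
-- def _add(x, y):
--     """Ripple add with an in-place preallocated result and index loop."""
--     L = len(x)
--     res = [0] * L
--     c = 0
--     j = L - 1
--     while j >= 0: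
--         a, b = x[j], y[j]
--         res[j] = a ^ b ^ c
--         c = (a & b) | (c & (a ^ b))
--         j -= 1
--     return res
--
-- def mantissa_multiply(n, es, count1, count2, num_array_a, num_array_b):
--     ia = count1 + 1 + es
--     ib = count2 + 1 + es
--     arr = num_array_b[ib:n]
--     m = [1] + arr[:-1]
--     w = len(m)
--     acc = m
--     for i in range(ia, n):
--         if num_array_a[i] == 1:
--             s = (i - ia + 1) % w
--             acc = _add(acc, m[w - s:] + m[:w - s])
--     return acc
-- ===== Notes on version B (the rewrite author's own statement) =====
-- stated objective: simpler
-- what changed: B drops A's gap-list construction (k_arr/flag/LS) and the chained rotation of a running dup copy, instead fusing everything into one pass that, at each set bit i, rotates the fixed mantissa by the absolute offset (i-ia+1) mod w, and replaces A's reversed-zip/append/reverse ripple adder by an in-place preallocated, index-descending add loop.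
import Mathlib
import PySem

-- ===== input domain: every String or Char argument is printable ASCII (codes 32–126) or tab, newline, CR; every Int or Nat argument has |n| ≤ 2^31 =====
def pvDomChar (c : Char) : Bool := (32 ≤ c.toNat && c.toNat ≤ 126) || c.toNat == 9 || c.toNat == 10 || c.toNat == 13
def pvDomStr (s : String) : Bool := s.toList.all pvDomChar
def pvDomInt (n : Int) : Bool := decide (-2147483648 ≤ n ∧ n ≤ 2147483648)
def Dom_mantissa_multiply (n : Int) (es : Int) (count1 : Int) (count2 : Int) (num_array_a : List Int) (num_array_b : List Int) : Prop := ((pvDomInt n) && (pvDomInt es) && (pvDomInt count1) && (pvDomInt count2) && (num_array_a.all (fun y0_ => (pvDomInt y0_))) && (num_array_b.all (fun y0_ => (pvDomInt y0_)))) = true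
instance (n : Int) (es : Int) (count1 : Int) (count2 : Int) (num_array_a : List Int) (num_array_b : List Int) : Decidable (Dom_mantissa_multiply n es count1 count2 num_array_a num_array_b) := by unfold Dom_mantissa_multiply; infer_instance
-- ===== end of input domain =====

-- B replaces A's gap-list (k_arr/flag/LS) bookkeeping and chained dup-rotations by one fused pass
-- that rotates the fixed mantissa by the absolute offset, and replaces the reversed-zip/append/
-- reverse ripple adder by an in-place indexed descending loop (objective: simpler).

-- ===== PORT A =====
def pv_full_adder (a b cin : Int) : Int × Int :=
  (PySem.Int.bxor (PySem.Int.bxor a b) cin,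
   PySem.Int.bor (PySem.Int.band a b) (PySem.Int.band cin (PySem.Int.bxor a b)))

def pv_adder (arr1 arr2 : List Int) : List Int :=
  let st := (arr1.reverse.zip arr2.reverse).foldl
    (fun (st : List Int × Int) (ab : Int × Int) =>
      let fa := pv_full_adder ab.1 ab.2 st.2
      (st.1 ++ [fa.1], fa.2)) ([], 0)
  st.1.reverse

def mantissa_multiply (n : Int) (es : Int) (count1 : Int) (count2 : Int) (num_array_a : List Int) (num_array_b : List Int) : List Int :=
  let index_a := count1 + 1 + es
  let index_b := count2 + 1 + es
  let st1 := (PySem.List.pyRange index_a n 1).foldl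
    (fun (st : List Int × Int × Int) (i : Int) =>
      let st' := if PySem.List.pyGetD num_array_a i 0 = 1
                 then (st.1 ++ [st.2.1], 0, st.2.2 + st.2.1)
                 else st
      (st'.1, st'.2.1 + 1, st'.2.2)) ([], 1, 0)
  let arr := PySem.List.slice num_array_b (some index_b) (some n)
  let array_1 := 1 :: PySem.List.slice arr none (some (-1))
  let n_frac : Int := (array_1.length : Int)
  let res := st1.1.foldl
    (fun (st : List Int × List Int) (k0 : Int) =>
      let k := PySem.Int.mod k0 n_frac
      let array_2 := PySem.List.slice st.2 (some (-k)) none ++ PySem.List.slice st.2 none (some (-k))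
      (pv_adder st.1 array_2, array_2)) (array_1, array_1)
  res.1

-- ===== PORT B =====
def pv_add_go (x y : List Int) : List Int → Int → Nat → List Int
  | res, _, 0 => res
  | res, c, Nat.succ j =>
    let a := PySem.List.pyGetD x ((j : Nat) : Int) 0
    let b := PySem.List.pyGetD y ((j : Nat) : Int) 0
    pv_add_go x y
      (PySem.List.pySetD res ((j : Nat) : Int) (PySem.Int.bxor (PySem.Int.bxor a b) c))
      (PySem.Int.bor (PySem.Int.band a b) (PySem.Int.band c (PySem.Int.bxor a b))) j

def pv_add (x y : List Int) : List Int :=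
  pv_add_go x y (List.replicate x.length 0) 0 x.length

def mantissa_multiply_alt (n : Int) (es : Int) (count1 : Int) (count2 : Int) (num_array_a : List Int) (num_array_b : List Int) : List Int :=
  let ia := count1 + 1 + es
  let ib := count2 + 1 + es
  let arr := PySem.List.slice num_array_b (some ib) (some n)
  let m := 1 :: PySem.List.slice arr none (some (-1))
  let w : Int := (m.length : Int)
  (PySem.List.pyRange ia n 1).foldl
    (fun (acc : List Int) (i : Int) =>
      if PySem.List.pyGetD num_array_a i 0 = 1 then
        let s := PySem.Int.mod (i - ia + 1) w
        pv_add acc (PySem.List.slice m (some (w - s)) none ++ PySem.List.slice m none (some (w - s)))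
      else acc) m

-- ===== PRECONDITION & SPEC =====
-- Pre_ excludes exactly the inputs where A raises IndexError: the loop 'for i in range(index_a, n)'
-- reads num_array_a[i], which raises unless every such i is a valid (possibly negative) index.
def Pre_mantissa_multiply (n : Int) (es : Int) (count1 : Int) (count2 : Int) (num_array_a : List Int) (num_array_b : List Int) : Prop :=
  count1 + 1 + es < n →
    (-(num_array_a.length : Int) ≤ count1 + 1 + es ∧ n ≤ (num_array_a.length : Int))
instance (n : Int) (es : Int) (count1 : Int) (count2 : Int) (num_array_a : List Int) (num_array_b : List Int) : Decidable (Pre_mantissa_multiply n es count1 count2 num_array_a num_array_b) := by unfold Pre_mantissa_multiply; infer_instance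

def pvWitness_mantissa_multiply : Int × Int × Int × Int × List Int × List Int :=
  (4, 0, 0, 0, [1, 0, 1, 0], [1, 1, 0, 1])

def Spec_mantissa_multiply (n : Int) (es : Int) (count1 : Int) (count2 : Int) (num_array_a : List Int) (num_array_b : List Int) (out : List Int) : Prop := out = mantissa_multiply_alt n es count1 count2 num_array_a num_array_b
instance (n : Int) (es : Int) (count1 : Int) (count2 : Int) (num_array_a : List Int) (num_array_b : List Int) (out : List Int) : Decidable (Spec_mantissa_multiply n es count1 count2 num_array_a num_array_b out) := by unfold Spec_mantissa_multiply; infer_instance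

-- ===== CLAIM (what is proved, stated in full; the proofs are below) =====
def Claim_equal_mantissa_multiply : Prop := ∀ (n : Int) (es : Int) (count1 : Int) (count2 : Int) (num_array_a : List Int) (num_array_b : List Int), Dom_mantissa_multiply n es count1 count2 num_array_a num_array_b → Pre_mantissa_multiply n es count1 count2 num_array_a num_array_b → Spec_mantissa_multiply n es count1 count2 num_array_a num_array_b (mantissa_multiply n es count1 count2 num_array_a num_array_b)

-- ===== LEMMAS AND PROOFS =====

-- proof-only names for the loop bodies of the two ports
def stepK (a : List Int) (st : List Int × Int × Int) (i : Int) : List Int × Int × Int :=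
  let st' := if PySem.List.pyGetD a i 0 = 1
             then (st.1 ++ [st.2.1], 0, st.2.2 + st.2.1)
             else st
  (st'.1, st'.2.1 + 1, st'.2.2)

def stepA (w : Int) (st : List Int × List Int) (k0 : Int) : List Int × List Int :=
  let k := PySem.Int.mod k0 w
  let array_2 := PySem.List.slice st.2 (some (-k)) none ++ PySem.List.slice st.2 none (some (-k))
  (pv_adder st.1 array_2, array_2)

def stepB (a : List Int) (ia : Int) (m : List Int) (w : Int) (acc : List Int) (i : Int) : List Int :=
  if PySem.List.pyGetD a i 0 = 1 then
    let s := PySem.Int.mod (i - ia + 1) w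
    pv_add acc (PySem.List.slice m (some (w - s)) none ++ PySem.List.slice m none (some (w - s)))
  else acc

lemma A_char (n es count1 count2 : Int) (a b : List Int) :
    mantissa_multiply n es count1 count2 a b =
      (((PySem.List.pyRange (count1 + 1 + es) n 1).foldl (stepK a) ([], 1, 0)).1.foldl
        (stepA (((1 : Int) :: PySem.List.slice (PySem.List.slice b (some (count2 + 1 + es)) (some n)) none (some (-1))).length : Int))
        ((1 : Int) :: PySem.List.slice (PySem.List.slice b (some (count2 + 1 + es)) (some n)) none (some (-1)),
         (1 : Int) :: PySem.List.slice (PySem.List.slice b (some (count2 + 1 + es)) (some n)) none (some (-1)))).1 := rfl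

lemma B_char (n es count1 count2 : Int) (a b : List Int) :
    mantissa_multiply_alt n es count1 count2 a b =
      (PySem.List.pyRange (count1 + 1 + es) n 1).foldl
        (stepB a (count1 + 1 + es)
          ((1 : Int) :: PySem.List.slice (PySem.List.slice b (some (count2 + 1 + es)) (some n)) none (some (-1)))
          (((1 : Int) :: PySem.List.slice (PySem.List.slice b (some (count2 + 1 + es)) (some n)) none (some (-1))).length : Int))
        ((1 : Int) :: PySem.List.slice (PySem.List.slice b (some (count2 + 1 + es)) (some n)) none (some (-1))) := rfl

-- reference ripple-carry adder, right-to-left structural recursion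
def addRec : List Int → List Int → List Int × Int
  | a :: xs, b :: ys =>
    let rc := addRec xs ys
    ((pv_full_adder a b rc.2).1 :: rc.1, (pv_full_adder a b rc.2).2)
  | _, _ => ([], 0)

lemma addRec_len (x : List Int) : ∀ (y : List Int), x.length = y.length →
    (addRec x y).1.length = x.length := by
  induction x with
  | nil => intro y h; cases y <;> simp_all [addRec]
  | cons a xs ih =>
    intro y h
    cases y with
    | nil => simp at h
    | cons b ys => simp [addRec, ih ys (by simpa using h)]

lemma foldl_ripple (x : List Int) : ∀ (y : List Int), x.length = y.length → ∀ (acc : List Int),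
    (x.reverse.zip y.reverse).foldl
      (fun (st : List Int × Int) (ab : Int × Int) =>
        let fa := pv_full_adder ab.1 ab.2 st.2
        (st.1 ++ [fa.1], fa.2)) (acc, 0)
      = (acc ++ (addRec x y).1.reverse, (addRec x y).2) := by
  induction x with
  | nil => intro y h acc; cases y <;> simp_all [addRec]
  | cons a xs ih =>
    intro y h acc
    cases y with
    | nil => simp at h
    | cons b ys =>
      have hlen : xs.reverse.length = ys.reverse.length := by
        simp; simpa using h
      rw [List.reverse_cons, List.reverse_cons, List.zip_append hlen,
          List.foldl_append, ih ys (by simpa using h) acc]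
      simp [addRec, List.append_assoc]

lemma pv_adder_eq (x y : List Int) (h : x.length = y.length) :
    pv_adder x y = (addRec x y).1 := by
  unfold pv_adder
  rw [foldl_ripple x y h []]
  simp

lemma pv_add_go_suffix (x y : List Int) (h : x.length = y.length) :
    ∀ i, i ≤ x.length →
      pv_add_go x y (List.replicate i 0 ++ (addRec (x.drop i) (y.drop i)).1)
        ((addRec (x.drop i) (y.drop i)).2) i = (addRec x y).1 := by
  intro i
  induction i with
  | zero => intro _; simp [pv_add_go]
  | succ i ih =>
    intro hle
    have hi : i < x.length := by omega
    have hi' : i < y.length := by omega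
    have hdx : x.drop i = x[i] :: x.drop (i + 1) := List.drop_eq_getElem_cons hi
    have hdy : y.drop i = y[i] :: y.drop (i + 1) := List.drop_eq_getElem_cons hi'
    have hget : PySem.List.pyGetD x ((i : Nat) : Int) 0 = x[i] := by
      rw [PySem.List.pyGetD_natCast, List.getD_eq_getElem _ _ hi]
    have hget' : PySem.List.pyGetD y ((i : Nat) : Int) 0 = y[i] := by
      rw [PySem.List.pyGetD_natCast, List.getD_eq_getElem _ _ hi']
    set T := (addRec (x.drop (i + 1)) (y.drop (i + 1))).1 with hT
    set c := (addRec (x.drop (i + 1)) (y.drop (i + 1))).2 with hc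
    have hrec : addRec (x.drop i) (y.drop i) =
        ((pv_full_adder x[i] y[i] c).1 :: T, (pv_full_adder x[i] y[i] c).2) := by
      rw [hdx, hdy]; rfl
    have hsetlen : i < (List.replicate (i + 1) (0 : Int) ++ T).length := by
      simp
      omega
    have hsnoc : ∀ v : Int, (List.replicate i (0 : Int) ++ [0]).set i v
        = List.replicate i 0 ++ [v] := by
      intro v
      have hl : (List.replicate i (0 : Int)).length = i := by simp
      calc (List.replicate i (0 : Int) ++ [0]).set i v
          = (List.replicate i (0 : Int) ++ [0]).set (List.replicate i (0 : Int)).length v := by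
            rw [hl]
        _ = List.replicate i 0 ++ [v] := by
            rw [List.set_append_right _ _ le_rfl]
            simp
    have hset : ∀ v : Int, PySem.List.pySetD (List.replicate (i + 1) (0 : Int) ++ T) ((i : Nat) : Int) v
        = List.replicate i 0 ++ v :: T := by
      intro v
      have hs := PySem.List.pySet?_natCast (List.replicate (i + 1) (0 : Int) ++ T) i v hsetlen
      have hd : PySem.List.pySetD (List.replicate (i + 1) (0 : Int) ++ T) ((i : Nat) : Int) v
          = ((List.replicate (i + 1) (0 : Int) ++ T).set i v) := by
        simp [PySem.List.pySetD, hs]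
      rw [hd, List.replicate_succ']
      rw [List.set_append_left _ _ (by simp), hsnoc]
      simp
    simp only [pv_add_go]
    rw [hget, hget', hset]
    have key := ih (by omega)
    rw [hrec] at key
    exact key

lemma pv_add_eq (x y : List Int) (h : x.length = y.length) :
    pv_add x y = (addRec x y).1 := by
  have := pv_add_go_suffix x y h x.length le_rfl
  have hx : x.drop x.length = [] := by simp
  have hy : y.drop x.length = [] := by rw [h]; simp
  rw [hx, hy] at this
  simpa [pv_add, addRec] using this

lemma rotA_eq (d : List Int) (k : Int) (h0 : 0 ≤ k) (h1 : k < (d.length : Int)) :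
    PySem.List.slice d (some (-k)) none ++ PySem.List.slice d none (some (-k))
      = d.rotate (d.length - k.toNat) := by
  rcases eq_or_lt_of_le h0 with h | h
  · have hk : k = 0 := h.symm
    subst hk
    rw [show (-(0 : Int)) = (0 : Int) from neg_zero,
        PySem.List.slice_from d le_rfl, PySem.List.slice_to d le_rfl]
    simp [List.rotate_length]
  · have hkn : 0 < k.toNat := by omega
    have hneg : -k = -((k.toNat : Nat) : Int) := by omega
    rw [hneg, PySem.List.slice_from_neg_natCast d k.toNat hkn,
        PySem.List.slice_to_neg_natCast d k.toNat hkn,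
        List.rotate_eq_drop_append_take (by omega)]

lemma rotB_eq (m : List Int) (s : Int) (h0 : 0 ≤ s) (h1 : s < (m.length : Int)) :
    PySem.List.slice m (some ((m.length : Int) - s)) none ++ PySem.List.slice m none (some ((m.length : Int) - s))
      = m.rotate (m.length - s.toNat) := by
  have h2 : (0 : Int) ≤ (m.length : Int) - s := by omega
  rw [PySem.List.slice_from _ h2, PySem.List.slice_to _ h2,
      List.rotate_eq_drop_append_take (by omega)]
  congr 1 <;> congr 1 <;> omega

lemma rot_arith (L s k : Nat) (hs : s < L) (hk : k < L) :
    (L - s + (L - k)) % L = (L - (s + k) % L) % L := by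
  rcases Nat.lt_or_ge (s + k) L with h | h
  · rw [Nat.mod_eq_of_lt h]
    have he : L - s + (L - k) = L + (L - (s + k)) := by omega
    rw [he, Nat.add_mod_left]
  · have h2 : (s + k) % L = s + k - L := by
      rw [Nat.mod_eq_sub_mod h, Nat.mod_eq_of_lt (by omega)]
    have he : L - s + (L - k) = L - (s + k - L) := by omega
    rw [h2, he]

lemma rotate_step (m : List Int) (hm : 0 < m.length) (X Y : Int) :
    (m.rotate (m.length - (X % (m.length : Int)).toNat)).rotate
        (m.length - (Y % (m.length : Int)).toNat)
      = m.rotate (m.length - ((X + Y) % (m.length : Int)).toNat) := by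
  have hL : (0 : Int) < (m.length : Int) := by exact_mod_cast hm
  have hLne : (m.length : Int) ≠ 0 := ne_of_gt hL
  set L := m.length with hLdef
  set s := (X % (L : Int)).toNat with hs
  set k := (Y % (L : Int)).toNat with hk
  have hXs : X % (L : Int) = (s : Int) := (Int.toNat_of_nonneg (Int.emod_nonneg X hLne)).symm
  have hYk : Y % (L : Int) = (k : Int) := (Int.toNat_of_nonneg (Int.emod_nonneg Y hLne)).symm
  have hsL : s < L := by
    have h1 := Int.emod_lt_of_pos X hL
    have h2 := Int.emod_nonneg X hLne
    omega
  have hkL : k < L := by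
    have h1 := Int.emod_lt_of_pos Y hL
    have h2 := Int.emod_nonneg Y hLne
    omega
  have hsum : ((X + Y) % (L : Int)).toNat = (s + k) % L := by
    have h1 : (X + Y) % (L : Int) = (((s + k) % L : Nat) : Int) := by
      rw [Int.add_emod, hXs, hYk]
      have h2 : ((s : Int) + (k : Int)) = ((s + k : Nat) : Int) := by push_cast; ring
      rw [h2, ← Int.natCast_mod]
    rw [h1, Int.toNat_natCast]
  rw [List.rotate_rotate, hsum]
  calc m.rotate (L - s + (L - k))
      = m.rotate ((L - s + (L - k)) % L) := (List.rotate_mod _ _).symm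
    _ = m.rotate ((L - (s + k) % L) % L) := by rw [rot_arith L s k hsL hkL]
    _ = m.rotate (L - (s + k) % L) := List.rotate_mod _ _

lemma pyRange_nil {a b : Int} (h : b ≤ a) : PySem.List.pyRange a b 1 = [] := by
  simp [PySem.List.pyRange]
  omega

lemma fold_stepA_len (m : List Int) (hm : 0 < m.length) :
    ∀ (K : List Int) (st : List Int × List Int), st.1.length = m.length → st.2.length = m.length →
      ((K.foldl (stepA (m.length : Int)) st).1.length = m.length
        ∧ (K.foldl (stepA (m.length : Int)) st).2.length = m.length) := by
  have hw : (0 : Int) < (m.length : Int) := by exact_mod_cast hm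
  intro K
  induction K with
  | nil => intro st h1 h2; exact ⟨h1, h2⟩
  | cons k0 K ih =>
    intro st h1 h2
    have hk0 : 0 ≤ PySem.Int.mod k0 (m.length : Int) := PySem.Int.mod_nonneg k0 hw
    have hk1 : PySem.Int.mod k0 (m.length : Int) < (m.length : Int) := PySem.Int.mod_lt k0 hw
    have hA2 := rotA_eq st.2 (PySem.Int.mod k0 (m.length : Int)) hk0 (by rw [h2]; exact hk1)
    have hrl : (st.2.rotate (st.2.length - (PySem.Int.mod k0 (m.length : Int)).toNat)).length
        = m.length := by rw [List.length_rotate, h2]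
    have heq : st.1.length
        = (st.2.rotate (st.2.length - (PySem.Int.mod k0 (m.length : Int)).toNat)).length := by
      rw [hrl, h1]
    simp only [List.foldl_cons, stepA, hA2]
    exact ih _ (by rw [pv_adder_eq _ _ heq, addRec_len _ _ heq, h1]) hrl

lemma main_inv (a : List Int) (ia : Int) (m : List Int) (hm : 0 < m.length) :
    ∀ d : Nat,
      ((PySem.List.pyRange ia (ia + (d : Int)) 1).foldl (stepK a) ([], 1, 0)).1.foldl
          (stepA (m.length : Int)) (m, m)
        = ((PySem.List.pyRange ia (ia + (d : Int)) 1).foldl (stepB a ia m (m.length : Int)) m,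
           m.rotate (m.length -
             (((d : Int) + 1 -
                ((PySem.List.pyRange ia (ia + (d : Int)) 1).foldl (stepK a) ([], 1, 0)).2.1) %
               (m.length : Int)).toNat)) := by
  have hw : (0 : Int) < (m.length : Int) := by exact_mod_cast hm
  intro d
  induction d with
  | zero =>
    have h0 : PySem.List.pyRange ia (ia + ((0 : Nat) : Int)) 1 = [] := by
      apply pyRange_nil; omega
    rw [h0]
    simp [List.rotate_length]
  | succ d ih =>
    have hca : ia + ((d + 1 : Nat) : Int) = (ia + (d : Int)) + 1 := by push_cast; ring
    have hle : ia ≤ ia + (d : Int) := by omega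
    rw [hca, PySem.List.pyRange_one_succ_right hle]
    simp only [List.foldl_append, List.foldl_cons, List.foldl_nil]
    set R := PySem.List.pyRange ia (ia + (d : Int)) 1 with hR
    set P := R.foldl (stepK a) (([] : List Int), (1 : Int), (0 : Int)) with hP
    by_cases hbit : PySem.List.pyGetD a (ia + (d : Int)) 0 = 1
    · have hstep : stepK a P (ia + (d : Int)) = (P.1 ++ [P.2.1], 1, P.2.2 + P.2.1) := by
        simp [stepK, hbit]
      rw [hstep]
      dsimp only
      rw [List.foldl_append]
      simp only [List.foldl_cons, List.foldl_nil]
      rw [ih]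
      set F := P.2.1 with hF
      set Bacc := R.foldl (stepB a ia m (m.length : Int)) m with hB
      set X := (d : Int) + 1 - F with hX
      have hBl : Bacc.length = m.length := by
        have hl := (fold_stepA_len m hm P.1 (m, m) rfl rfl).1
        rw [ih] at hl
        exact hl
      -- A-side step
      have hmod : PySem.Int.mod F (m.length : Int) = F % (m.length : Int) :=
        PySem.Int.mod_eq_emod_of_pos hw
      have hk0 : 0 ≤ PySem.Int.mod F (m.length : Int) := PySem.Int.mod_nonneg F hw
      have hk1 : PySem.Int.mod F (m.length : Int) < (m.length : Int) := PySem.Int.mod_lt F hw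
      have hduplen : (m.rotate (m.length - (X % (m.length : Int)).toNat)).length = m.length :=
        List.length_rotate _ _
      have hrotA := rotA_eq (m.rotate (m.length - (X % (m.length : Int)).toNat))
        (PySem.Int.mod F (m.length : Int)) hk0 (by rw [hduplen]; exact hk1)
      rw [hduplen, hmod] at hrotA
      have hcomp := rotate_step m hm X F
      rw [show X + F = (d : Int) + 1 by rw [hX]; ring] at hcomp
      -- B-side step
      have harg : ia + (d : Int) - ia + 1 = (d : Int) + 1 := by ring
      have hmods : PySem.Int.mod ((d : Int) + 1) (m.length : Int)
          = ((d : Int) + 1) % (m.length : Int) := PySem.Int.mod_eq_emod_of_pos hw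
      have hs0 : 0 ≤ ((d : Int) + 1) % (m.length : Int) := Int.emod_nonneg _ (ne_of_gt hw)
      have hs1 : ((d : Int) + 1) % (m.length : Int) < (m.length : Int) :=
        Int.emod_lt_of_pos _ hw
      have hrotB := rotB_eq m (((d : Int) + 1) % (m.length : Int)) hs0 hs1
      have hflag : ((d + 1 : Nat) : Int) + 1 - 1 = (d : Int) + 1 := by push_cast; ring
      simp only [stepA, stepB, if_pos hbit, harg, hmods, hrotB, hflag, hmod, hrotA, hcomp]
      -- both components now: (pv_adder Bacc ROT, ROT) = (pv_add Bacc ROT, ROT)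
      have hrlen : Bacc.length
          = (m.rotate (m.length - (((d : Int) + 1) % (m.length : Int)).toNat)).length := by
        rw [List.length_rotate, hBl]
      rw [pv_adder_eq _ _ hrlen, pv_add_eq _ _ hrlen]
    · have hstep : stepK a P (ia + (d : Int)) = (P.1, P.2.1 + 1, P.2.2) := by
        simp [stepK, hbit]
      rw [hstep]
      dsimp only
      rw [ih]
      have hflag : ((d + 1 : Nat) : Int) + 1 - (P.2.1 + 1) = (d : Int) + 1 - P.2.1 := by
        push_cast; ring
      simp only [stepB, if_neg hbit, hflag]

-- ===== VERDICT (by name: the statement is the Claim_ definition above) =====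
theorem mantissa_multiply_spec : Claim_equal_mantissa_multiply := by
  intro n es count1 count2 a b _ _
  unfold Spec_mantissa_multiply
  rw [A_char, B_char]
  set m := (1 : Int) :: PySem.List.slice (PySem.List.slice b (some (count2 + 1 + es)) (some n)) none (some (-1)) with hmdef
  have hmlen : 0 < m.length := by simp [hmdef]
  set ia := count1 + 1 + es with hia
  rcases Int.lt_or_le n ia with hlt | hle
  · have hnil : PySem.List.pyRange ia n 1 = [] := pyRange_nil (le_of_lt hlt)
    rw [hnil]
    simp
  · have hd : n = ia + (((n - ia).toNat : Nat) : Int) := by omega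
    rw [hd, main_inv a ia m hmlen (n - ia).toNat]
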